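-- pv_equiv track=rewrite | github.com/jsavargas/genrut | rutchile.py | calculaDV
-- ===== SOURCE A (Python) =====
-- def calculaDV(rut):
--     # Calcula el dígito verificador válido para un RUT
--     rut_str=str(rut)[::-1]  # Invierte el string! Ver http://stackoverflow.com/questions/931092/reverse-a-string-in-python
--
--     # Variables para el cálculo
--     multiplicador=2
--     suma=0
--
--     for c in rut_str:
--         # Iteramos sobre todos los caracteres del RUT ya invertido, sumando los dígitos * el multiplicador
--         suma+=int(c)*multiplicador
--         multiplicador+=1
--         if multiplicador>7:
--             multiplicador=2
--
--     dv=str(11-(suma%11))  # 11 - Módulo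
--
--     # Excepciones
--     if dv=='11':
--         dv='0'
--     if dv=='10':
--         dv='K'
--
--     return dv
-- ===== SOURCE B (Python) =====
-- def calculaDV(rut):
--     # Pure integer arithmetic, no string handling: since the weights repeat with
--     # period 6, consume the number in 6-digit blocks, applying the fixed weight
--     # tuple (2,3,4,5,6,7) to each block's digits extracted by divmod.
--     n = rut
--     suma = 0
--     while n > 0:
--         block = n % 1000000
--         n //= 1000000
--         for w in (2, 3, 4, 5, 6, 7):
--             block, d = divmod(block, 10)
--             suma += d * w
--     m = (11 - suma % 11) % 11
--     return 'K' if m == 10 else str(m)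
-- ===== Notes on version B (the rewrite author's own statement) =====
-- stated objective: alternative
-- what changed: B does no string handling at all: instead of reversing str(rut) and cycling a mutable multiplier per character, it consumes the integer itself in 6-digit blocks (the period of the weights) extracting digits by divmod against the fixed weight tuple (2,3,4,5,6,7), and collapses A's '11'/'10' string special cases into the arithmetic (11 - suma % 11) % 11 with a single 'K' test.
-- outside the precondition, e.g. on calculaDV(-7): A raises ValueError, B returns '0'
import Mathlib
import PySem

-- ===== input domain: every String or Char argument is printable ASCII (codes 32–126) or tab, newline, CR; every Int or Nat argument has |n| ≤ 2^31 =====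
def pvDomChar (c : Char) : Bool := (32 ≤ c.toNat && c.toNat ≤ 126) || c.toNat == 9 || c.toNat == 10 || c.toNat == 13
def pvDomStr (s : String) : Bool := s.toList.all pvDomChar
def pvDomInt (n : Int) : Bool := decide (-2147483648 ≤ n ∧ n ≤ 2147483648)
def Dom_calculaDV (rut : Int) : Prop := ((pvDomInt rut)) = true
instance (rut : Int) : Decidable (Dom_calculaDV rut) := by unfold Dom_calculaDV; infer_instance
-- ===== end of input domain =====

-- B avoids string handling entirely: it consumes the integer in 6-digit blocks (the weight
-- period) by divmod against the fixed weight tuple (2..7), and folds A's '11'/'10' string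
-- special cases into the arithmetic (11 - suma % 11) % 11 with a single 'K' test.

-- ===== PORT A =====
-- A's for-loop over the reversed string: state (multiplicador, suma); int(c) = PySem.Int.ofChars? [c]
-- (none exactly where Python raises ValueError).
def calcLoopA : List Char → Int → Int → Option Int
  | [], _, suma => some suma
  | c :: cs, mult, suma =>
    match PySem.Int.ofChars? [c] with
    | none => none
    | some d =>
      calcLoopA cs (if mult + 1 > 7 then 2 else mult + 1) (suma + d * mult)

def calculaDV (rut : Int) : String :=
  -- str(rut)[::-1]: strings are ported through List Char; [::-1] is List.reverse (exact)
  match calcLoopA ((PySem.Int.toChars rut).reverse) 2 0 with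
  | none => ""   -- Python raises ValueError here (rut < 0); excluded by Pre_calculaDV
  | some suma =>
    let dv := PySem.Int.toStr (11 - PySem.Int.mod suma 11)
    let dv1 := if dv = "11" then "0" else dv
    if dv1 = "10" then "K" else dv1

-- ===== PORT B =====
-- for w in (2,3,4,5,6,7): block, d = divmod(block, 10); suma += d * w
def blockLoop : Int → Int → List Int → Int
  | _, suma, [] => suma
  | block, suma, w :: ws =>
    blockLoop (PySem.Int.floordiv block 10) (suma + PySem.Int.mod block 10 * w) ws

-- while n > 0: block = n % 1000000; n //= 1000000; <inner loop>
def bloop (n suma : Int) : Int :=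
  if 0 < n then
    bloop (PySem.Int.floordiv n 1000000) (blockLoop (PySem.Int.mod n 1000000) suma [2, 3, 4, 5, 6, 7])
  else suma
termination_by n.toNat
decreasing_by
  rw [PySem.Int.floordiv_eq_ediv_of_pos (by norm_num)]
  omega

def calculaDV_alt (rut : Int) : String :=
  let suma := bloop rut 0
  let m := PySem.Int.mod (11 - PySem.Int.mod suma 11) 11
  if m = 10 then "K" else PySem.Int.toStr m

-- ===== PRECONDITION & SPEC =====
-- Python A raises ValueError on negative rut (int('-') on the sign character); Pre_ excludes exactly those.
def Pre_calculaDV (rut : Int) : Prop := 0 ≤ rut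
instance (rut : Int) : Decidable (Pre_calculaDV rut) := by unfold Pre_calculaDV; infer_instance
def pvWitness_calculaDV : Int := (30686957)

def Spec_calculaDV (rut : Int) (out : String) : Prop := out = calculaDV_alt rut
instance (rut : Int) (out : String) : Decidable (Spec_calculaDV rut out) := by unfold Spec_calculaDV; infer_instance

-- ===== CLAIM (what is proved, stated in full; the proofs are below) =====
def Claim_equal_calculaDV : Prop := ∀ (rut : Int), Dom_calculaDV rut → Pre_calculaDV rut → Spec_calculaDV rut (calculaDV rut)

-- ===== LEMMAS AND PROOFS =====

-- Reference weighted digit sum of a natural number: the digit at decimal position j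
-- (counted from the units digit, offset included) carries weight 2 + j % 6.
def W (m j : Nat) : Int :=
  if m < 10 then (m : Int) * (2 + ((j % 6 : Nat) : Int))
  else W (m / 10) (j + 1) + ((m % 10 : Nat) : Int) * (2 + ((j % 6 : Nat) : Int))
termination_by m
decreasing_by exact Nat.div_lt_self (by omega) (by norm_num)

lemma W_split (m j : Nat) :
    W m j = ((m % 10 : Nat) : Int) * (2 + ((j % 6 : Nat) : Int)) + W (m / 10) (j + 1) := by
  rw [W]
  split_ifs with h
  · rw [Nat.mod_eq_of_lt h, Nat.div_eq_of_lt h, W]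
    simp
  · ring

lemma W_zero (j : Nat) : W 0 j = 0 := by
  rw [W]; norm_num

lemma W_period (m : Nat) : ∀ j, W m (j + 6) = W m j := by
  induction m using Nat.strong_induction_on with
  | _ m ih =>
    intro j
    rcases Nat.eq_zero_or_pos m with h0 | h0
    · subst h0; rw [W_zero, W_zero]
    · rw [W_split m (j + 6), W_split m j,
          show (j + 6) % 6 = j % 6 by omega,
          show j + 6 + 1 = (j + 1) + 6 by omega,
          ih (m / 10) (Nat.div_lt_self h0 (by norm_num)) (j + 1)]

-- A's per-character sum over the reversed digit string: position j carries weight 2 + j % 6.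
def wsum : List Char → Nat → Option Int
  | [], _ => some 0
  | c :: cs, j =>
    match PySem.Int.ofChars? [c] with
    | none => none
    | some d => (wsum cs (j + 1)).map (fun t => d * (2 + ((j % 6 : Nat) : Int)) + t)

lemma mult_step (j : Nat) :
    (if (2 + ((j % 6 : Nat) : Int)) + 1 > 7 then (2 : Int) else (2 + ((j % 6 : Nat) : Int)) + 1)
      = 2 + (((j + 1) % 6 : Nat) : Int) := by
  split_ifs with h <;> omega

lemma calcLoopA_wsum (l : List Char) : ∀ (j : Nat) (suma : Int),
    calcLoopA l (2 + ((j % 6 : Nat) : Int)) suma = (wsum l j).map (fun t => suma + t) := by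
  induction l with
  | nil => intro j suma; simp [calcLoopA, wsum]
  | cons c cs ih =>
    intro j suma
    simp only [calcLoopA, wsum]
    cases h : PySem.Int.ofChars? [c] with
    | none => simp
    | some d =>
      dsimp only
      rw [mult_step j, ih (j + 1)]
      cases wsum cs (j + 1)
      · simp
      · simp
        ring

lemma ofChars_digitChar (d : Nat) (h : d < 10) :
    PySem.Int.ofChars? [Nat.digitChar d] = some (d : Int) := by
  interval_cases d <;> decide

lemma wsum_toDigits (m : Nat) : ∀ j, wsum (Nat.toDigits 10 m).reverse j = some (W m j) := by
  induction m using Nat.strong_induction_on with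
  | _ m ih =>
    intro j
    by_cases h : m < 10
    · rw [Nat.toDigits_of_lt_base h, W, if_pos h]
      simp [wsum, ofChars_digitChar m h]
    · rw [Nat.toDigits_of_base_le (by norm_num) (by omega), W_split]
      simp only [List.reverse_append, List.reverse_cons, List.reverse_nil, List.nil_append,
        List.singleton_append, wsum, ofChars_digitChar (m % 10) (Nat.mod_lt _ (by norm_num)),
        ih (m / 10) (Nat.div_lt_self (by omega) (by norm_num)) (j + 1), Option.map_some]

-- cast helpers for the block loop (literal divisors, so rw/simp can match syntactically)
lemma mod10_cast (m : Nat) : PySem.Int.mod (m : Int) 10 = ((m % 10 : Nat) : Int) := by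
  rw [PySem.Int.mod_eq_emod_of_pos (by norm_num)]; omega

lemma fdiv10_cast (m : Nat) : PySem.Int.floordiv (m : Int) 10 = ((m / 10 : Nat) : Int) := by
  rw [PySem.Int.floordiv_eq_ediv_of_pos (by norm_num)]; omega

lemma mod1e6_cast (m : Nat) : PySem.Int.mod (m : Int) 1000000 = ((m % 1000000 : Nat) : Int) := by
  rw [PySem.Int.mod_eq_emod_of_pos (by norm_num)]; omega

lemma fdiv1e6_cast (m : Nat) : PySem.Int.floordiv (m : Int) 1000000 = ((m / 1000000 : Nat) : Int) := by
  rw [PySem.Int.floordiv_eq_ediv_of_pos (by norm_num)]; omega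

lemma dig_eq (m c t : Nat) (h : 1000000 = c * t) (h10 : (10 : Nat) ∣ t) :
    m % 1000000 / c % 10 = m / c % 10 := by
  rw [h, Nat.mod_mul_right_div_self, Nat.mod_mod_of_dvd _ h10]

-- the inner 6-step loop on a block b, in Nat digits
lemma blockLoop_eval (b : Nat) (suma : Int) :
    blockLoop ((b : Nat) : Int) suma [2, 3, 4, 5, 6, 7]
      = suma + ((b % 10 : Nat) : Int) * 2 + ((b / 10 % 10 : Nat) : Int) * 3
             + ((b / 100 % 10 : Nat) : Int) * 4 + ((b / 1000 % 10 : Nat) : Int) * 5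
             + ((b / 10000 % 10 : Nat) : Int) * 6 + ((b / 100000 % 10 : Nat) : Int) * 7 := by
  simp only [blockLoop, mod10_cast, fdiv10_cast, Nat.div_div_eq_div_mul]

-- decomposition of W by one 6-digit block
lemma W_block (m : Nat) :
    W m 0 = ((m % 10 : Nat) : Int) * 2 + ((m / 10 % 10 : Nat) : Int) * 3
          + ((m / 100 % 10 : Nat) : Int) * 4 + ((m / 1000 % 10 : Nat) : Int) * 5
          + ((m / 10000 % 10 : Nat) : Int) * 6 + ((m / 100000 % 10 : Nat) : Int) * 7
          + W (m / 1000000) 0 := by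
  rw [W_split m 0, W_split (m / 10) 1, W_split (m / 10 / 10) 2, W_split (m / 10 / 10 / 10) 3,
      W_split (m / 10 / 10 / 10 / 10) 4, W_split (m / 10 / 10 / 10 / 10 / 10) 5,
      show (6 : Nat) = 0 + 6 by rfl, W_period]
  simp only [Nat.div_div_eq_div_mul]
  norm_num
  ring

lemma bloop_eq_W (m : Nat) : ∀ suma : Int, bloop (m : Int) suma = suma + W m 0 := by
  induction m using Nat.strong_induction_on with
  | _ m ih =>
    intro suma
    rcases Nat.eq_zero_or_pos m with h0 | h0
    · subst h0
      rw [bloop, W_zero]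
      norm_num
    · rw [bloop, if_pos (by exact_mod_cast h0), mod1e6_cast m, fdiv1e6_cast m, blockLoop_eval,
          ih (m / 1000000) (Nat.div_lt_self h0 (by norm_num)), W_block m,
          dig_eq m 10 100000 (by norm_num) (by norm_num),
          dig_eq m 100 10000 (by norm_num) (by norm_num),
          dig_eq m 1000 1000 (by norm_num) (by norm_num),
          dig_eq m 10000 100 (by norm_num) (by norm_num),
          dig_eq m 100000 10 (by norm_num) (by norm_num),
          Nat.mod_mod_of_dvd m (show (10:Nat) ∣ 1000000 by norm_num)]
      ring

lemma finish_eq (suma : Int) :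
    (if (if PySem.Int.toStr (11 - PySem.Int.mod suma 11) = "11" then "0"
         else PySem.Int.toStr (11 - PySem.Int.mod suma 11)) = "10" then "K"
     else (if PySem.Int.toStr (11 - PySem.Int.mod suma 11) = "11" then "0"
           else PySem.Int.toStr (11 - PySem.Int.mod suma 11)))
    = (if PySem.Int.mod (11 - PySem.Int.mod suma 11) 11 = 10 then "K"
       else PySem.Int.toStr (PySem.Int.mod (11 - PySem.Int.mod suma 11) 11)) := by
  have h0 : 0 ≤ PySem.Int.mod suma 11 := PySem.Int.mod_nonneg _ (by norm_num)
  have h1 : PySem.Int.mod suma 11 < 11 := PySem.Int.mod_lt _ (by norm_num)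
  obtain ⟨r, hr, h0, h1⟩ : ∃ r, PySem.Int.mod suma 11 = r ∧ 0 ≤ r ∧ r < 11 := ⟨_, rfl, h0, h1⟩
  rw [hr]
  interval_cases r <;> decide

-- ===== VERDICT (by name: the statement is the Claim_ definition above) =====
theorem calculaDV_spec : Claim_equal_calculaDV := by
  intro rut _ hpre
  show calculaDV rut = calculaDV_alt rut
  obtain ⟨m, rfl⟩ : ∃ m : Nat, rut = (m : Int) := ⟨rut.toNat, (Int.toNat_of_nonneg hpre).symm⟩
  unfold calculaDV calculaDV_alt
  have hA : calcLoopA ((PySem.Int.toChars (m : Int)).reverse) 2 0 = some (W m 0) := by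
    have htc : PySem.Int.toChars (m : Int) = Nat.toDigits 10 m := by
      simp [PySem.Int.toChars]
    have h := calcLoopA_wsum ((PySem.Int.toChars (m : Int)).reverse) 0 0
    norm_num at h
    rw [h, htc, wsum_toDigits m 0]
  have hB : bloop (m : Int) 0 = W m 0 := by
    rw [bloop_eq_W m 0]; ring
  rw [hA, hB]
  exact finish_eq (W m 0)
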